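-- pv_equiv track=rewrite | github.com/AlifSrSE/ProblemSolves | 2003C-turtleAndGoodPairs.py | solve
-- ===== SOURCE A (Python) =====
-- from collections import defaultdict
--
-- def solve(s):
--     counts = defaultdict(int)
--     for c in s:
--         counts[ord(c) - ord('a')] += 1
--
--     result = []
--     while len(result) != len(s):
--         for i in range(26):
--             if counts[i] > 0:
--                 result.append(chr(i + ord('a')))
--                 counts[i] -= 1
--
--     return ''.join(result)
-- ===== SOURCE B (Python) =====
-- def solve(s):
--     seen = {}
--     keyed = []
--     for c in s:
--         k = seen.get(c, 0)
--         seen[c] = k + 1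
--         keyed.append((k, c))
--     keyed.sort()
--     return ''.join(c for _, c in keyed)
-- ===== Notes on version B (the rewrite author's own statement) =====
-- stated objective: alternative
-- what changed: Replaces the round-robin while-loop over 26 count buckets by a single pass that tags each character with its 0-based occurrence index within its own letter, followed by one stable sort of the (occurrence, char) pairs; no round loop or bucket scan remains.
-- outside the precondition, e.g. on solve('aBc'): A does not finish within the time limit, B returns 'Bac'
import Mathlib
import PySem

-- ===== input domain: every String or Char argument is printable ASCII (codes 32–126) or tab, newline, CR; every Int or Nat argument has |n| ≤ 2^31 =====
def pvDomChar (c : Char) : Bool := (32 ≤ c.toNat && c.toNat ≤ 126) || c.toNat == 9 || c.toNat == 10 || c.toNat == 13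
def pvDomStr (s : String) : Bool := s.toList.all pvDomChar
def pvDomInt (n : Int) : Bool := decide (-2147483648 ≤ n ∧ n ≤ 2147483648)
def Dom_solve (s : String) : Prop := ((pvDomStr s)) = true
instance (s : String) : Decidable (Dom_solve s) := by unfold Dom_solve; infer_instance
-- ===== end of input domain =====

-- B replaces A's round-robin while-loop over 26 count buckets by one occurrence-indexing pass
-- followed by a single stable sort of (occurrence, char) pairs (objective: alternative algorithm).

-- ===== PORT A =====
-- one iteration of the inner `for i in range(26)` body
def aStep (st : List Char × PySem.Dict Int Int) (i : Int) : List Char × PySem.Dict Int Int :=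
  if 0 < st.2.getD i 0 then (st.1 ++ [Char.ofNat (i.toNat + 97)], st.2.modify i 0 (· - 1)) else st

-- the inner `for i in range(26)` pass
def aPass (st : List Char × PySem.Dict Int Int) : List Char × PySem.Dict Int Int :=
  (PySem.List.pyRange 0 26 1).foldl aStep st

-- the `while len(result) != len(s)` loop; the fuel only makes it total (n+1 passes always
-- suffice on the admitted inputs, where every count is at most n)
def aLoop : Nat → List Char × PySem.Dict Int Int → Nat → List Char
  | 0, st, _ => st.1
  | fuel + 1, st, n => if st.1.length = n then st.1 else aLoop fuel (aPass st) n

def solve (s : String) : String :=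
  let l := s.toList
  let counts := l.foldl (fun d c => d.modify ((c.toNat : Int) - 97) 0 (· + 1)) PySem.Dict.empty
  String.mk (aLoop (l.length + 1) ([], counts) l.length)

-- ===== PORT B =====
-- loop body: k = seen.get(c, 0); seen[c] = k + 1; keyed.append((k, c))
def bStep (st : List (Int × Char) × PySem.Dict Char Int) (c : Char) : List (Int × Char) × PySem.Dict Char Int :=
  let k := st.2.getD c 0
  (st.1 ++ [(k, c)], st.2.insert c (k + 1))

def solve_alt (s : String) : String :=
  let keyed := (s.toList.foldl bStep ([], PySem.Dict.empty)).1
  String.mk ((PySem.List.sorted2 keyed (·.1) (·.2) false).map (·.2))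

-- ===== PRECONDITION & SPEC =====
-- Pre_ excludes strings with any character outside 'a'..'z': on those A's while-loop never
-- terminates (the stray character is never appended), so A returns exactly on Pre_.
def Pre_solve (s : String) : Prop :=
  (s.toList.all (fun c => decide ('a' ≤ c) && decide (c ≤ 'z'))) = true
instance (s : String) : Decidable (Pre_solve s) := by unfold Pre_solve; infer_instance

def pvWitness_solve : String := "turtle"

def Spec_solve (s : String) (out : String) : Prop := out = solve_alt s
instance (s : String) (out : String) : Decidable (Spec_solve s out) := by unfold Spec_solve; infer_instance

-- ===== CLAIM (what is proved, stated in full; the proofs are below) =====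
def Claim_equal_solve : Prop := ∀ (s : String), Dom_solve s → Pre_solve s → Spec_solve s (solve s)

-- ===== LEMMAS AND PROOFS =====

-- the letter in bucket k, and the list of the 26 letters
def achr (k : Nat) : Char := Char.ofNat (k + 97)
def charList : List Char := (List.range 26).map achr
def intList : List Int := PySem.List.pyRange 0 26 1
-- A's bucket key of a character
def ckey (c : Char) : Int := (c.toNat : Int) - 97
-- a single integer key ordering (occurrence, char) pairs lexicographically
def phi (p : Int × Char) : Int := p.1 * 4294967296 + (p.2.toNat : Int)

-- A's output, round by round, as a function of the bucket counts g
def roundsA (g : Int → Int) (m : Nat) : List Char :=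
  (List.range m).flatMap
    (fun (r : Nat) => (intList.filter (fun i => decide ((r : Int) < g i))).map (fun i => Char.ofNat (i.toNat + 97)))

-- the canonical answer: round r lists the letters occurring more than r times, in order
def canon (l : List Char) (m : Nat) : List Char :=
  (List.range m).flatMap (fun r => charList.filter (fun c => decide (r < l.count c)))

-- the canonical answer with each character tagged by its round
def tpairs (l : List Char) (m : Nat) : List (Int × Char) :=
  (List.range m).flatMap
    (fun r => (charList.filter (fun c => decide (r < l.count c))).map (fun c => ((r : Int), c)))

theorem intList_eq : intList = (List.range 26).map (fun (k : Nat) => (k : Int)) := by decide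

theorem intList_nodup : intList.Nodup := by decide

theorem mem_intList {i : Int} : i ∈ intList ↔ 0 ≤ i ∧ i < 26 := by
  rw [intList_eq]; constructor
  · intro h
    obtain ⟨k, hk, rfl⟩ := List.mem_map.mp h
    rw [List.mem_range] at hk
    omega
  · intro ⟨h0, h26⟩
    exact List.mem_map.mpr ⟨i.toNat, List.mem_range.mpr (by omega), by omega⟩

theorem char_lt_iff {a b : Char} : a < b ↔ a.toNat < b.toNat := by
  rw [Char.lt_def, UInt32.lt_iff_toNat_lt]; rfl

theorem char_le_iff {a b : Char} : a ≤ b ↔ a.toNat ≤ b.toNat := by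
  rw [Char.le_def, UInt32.le_iff_toNat_le]; rfl

theorem char_toNat_lt (c : Char) : c.toNat < 4294967296 := c.val.toNat_lt_size

theorem achr_toNat {k : Nat} (hk : k < 26) : (achr k).toNat = k + 97 := by
  interval_cases k <;> decide

theorem char_eq_achr {c : Char} (h : 'a' ≤ c ∧ c ≤ 'z') :
    c = achr (c.toNat - 97) ∧ c.toNat - 97 < 26 := by
  have h1 : 97 ≤ c.toNat := char_le_iff.mp h.1
  have h2 : c.toNat ≤ 122 := char_le_iff.mp h.2
  refine ⟨?_, by omega⟩
  have he : c.toNat - 97 + 97 = c.toNat := by omega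
  rw [achr, he, Char.ofNat_toNat]

-- ---------- generic helpers ----------

theorem flatMap_congr_fun {α β : Type} {f g : α → List β} (h : ∀ r, f r = g r) (l : List α) :
    l.flatMap f = l.flatMap g := by
  have : f = g := funext h
  rw [this]

theorem sum_map_add {α : Type} (l : List α) (f h : α → Int) :
    (l.map (fun x => f x + h x)).sum = (l.map f).sum + (l.map h).sum := by
  induction l with
  | nil => simp
  | cons a l ih => simp only [List.map_cons, List.sum_cons, ih]; ring

theorem sum_map_eq_zero {l : List Int} {g : Int → Int}
    (h0 : ∀ x ∈ l, 0 ≤ g x) (hs : (l.map g).sum = 0) : ∀ x ∈ l, g x = 0 := by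
  induction l with
  | nil => simp
  | cons a l ih =>
    simp only [List.map_cons, List.sum_cons] at hs
    have ha : 0 ≤ g a := h0 a List.mem_cons_self
    have hl : 0 ≤ (l.map g).sum := by
      apply List.sum_nonneg; intro x hx
      simp only [List.mem_map] at hx; obtain ⟨y, hy, rfl⟩ := hx
      exact h0 y (List.mem_cons_of_mem _ hy)
    intro x hx
    rcases List.mem_cons.mp hx with rfl | hx
    · omega
    · exact ih (fun y hy => h0 y (List.mem_cons_of_mem _ hy)) (by omega) x hx

theorem sum_map_decrement (is : List Int) (g g' : Int → Int)
    (h : ∀ i ∈ is, g' i = if 0 < g i then g i - 1 else g i) :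
    (is.map g').sum = (is.map g).sum - ((is.filter (fun i => decide (0 < g i))).length : Int) := by
  induction is with
  | nil => simp
  | cons a l ih =>
    have ha := h a List.mem_cons_self
    have ihl := ih (fun i hi => h i (List.mem_cons_of_mem _ hi))
    by_cases hpos : 0 < g a
    · simp only [List.map_cons, List.sum_cons, List.filter_cons, hpos, decide_true,
        if_true, List.length_cons, ha, ihl]
      push_cast; ring
    · simp only [List.map_cons, List.sum_cons, List.filter_cons, hpos, decide_false,
        Bool.false_eq_true, if_false, ha, ihl]
      ring

theorem sum_indicator (js : List Int) (x : Int) (hnd : js.Nodup) (hx : x ∈ js) :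
    (js.map (fun j => if j = x then (1 : Int) else 0)).sum = 1 := by
  induction js with
  | nil => simp at hx
  | cons a l ih =>
    have hnd' : l.Nodup := hnd.of_cons
    rcases List.mem_cons.mp hx with rfl | hx
    · have hz : (l.map (fun j => if j = x then (1 : Int) else 0)).sum = 0 := by
        apply List.sum_eq_zero
        intro y hy; simp only [List.mem_map] at hy; obtain ⟨j, hj, rfl⟩ := hy
        have hne : j ≠ x := fun h => (List.nodup_cons.mp hnd).1 (h ▸ hj)
        simp [hne]
      simp only [List.map_cons, List.sum_cons, hz]
      simp
    · have hax : a ≠ x := fun h => (List.nodup_cons.mp hnd).1 (h ▸ hx)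
      simp only [List.map_cons, List.sum_cons, if_neg hax, ih hnd' hx, zero_add]

theorem sum_counts (m : List Int) (js : List Int) (hnd : js.Nodup) (hm : ∀ x ∈ m, x ∈ js) :
    (js.map (fun j => (m.count j : Int))).sum = m.length := by
  induction m with
  | nil => simp
  | cons a l ih =>
    have hcnt : ∀ j : Int, ((a :: l).count j : Int)
        = (l.count j : Int) + (if j = a then (1 : Int) else 0) := by
      intro j
      rw [List.count_cons]
      by_cases h : a = j
      · subst h; simp
      · have h2 : ¬ (j = a) := fun hh => h hh.symm
        simp [h, h2]
    calc (js.map (fun j => ((a :: l).count j : Int))).sum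
        = (js.map (fun j => (l.count j : Int) + (if j = a then (1 : Int) else 0))).sum := by
          apply congrArg; apply List.map_congr_left; intro j _; exact hcnt j
      _ = (js.map (fun j => (l.count j : Int))).sum
            + (js.map (fun j => if j = a then (1 : Int) else 0)).sum :=
          sum_map_add js _ _
      _ = (l.length : Int) + 1 := by
          rw [ih (fun x hx => hm x (List.mem_cons_of_mem _ hx)),
            sum_indicator js a hnd (hm a List.mem_cons_self)]
      _ = ((a :: l).length : Int) := by push_cast [List.length_cons]; ring

-- ---------- A side: one pass over the 26 buckets ----------

theorem aPass_fst (is : List Int) (res : List Char) (d : PySem.Dict Int Int) (hnd : is.Nodup) :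
    (is.foldl aStep (res, d)).1
      = res ++ (is.filter (fun i => decide (0 < d.getD i 0))).map (fun i => Char.ofNat (i.toNat + 97)) := by
  induction is generalizing res d with
  | nil => simp
  | cons i is ih =>
    have hnd' : is.Nodup := hnd.of_cons
    have hni : i ∉ is := (List.nodup_cons.mp hnd).1
    by_cases hpos : 0 < d.getD i 0
    · have hstep : aStep (res, d) i = (res ++ [Char.ofNat (i.toNat + 97)], d.modify i 0 (· - 1)) := by
        simp [aStep, hpos]
      rw [List.foldl_cons, hstep, ih _ _ hnd']
      have hfil : is.filter (fun j => decide (0 < (d.modify i 0 (· - 1)).getD j 0))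
          = is.filter (fun j => decide (0 < d.getD j 0)) := by
        apply List.filter_congr
        intro j hj
        have hne : j ≠ i := fun h => hni (h ▸ hj)
        rw [PySem.Dict.getD_modify, if_neg hne]
      rw [hfil]
      simp [hpos]
    · have hstep : aStep (res, d) i = (res, d) := by simp [aStep, hpos]
      rw [List.foldl_cons, hstep, ih _ _ hnd']
      simp [hpos]

theorem aPass_snd (is : List Int) (res : List Char) (d : PySem.Dict Int Int) (hnd : is.Nodup) (j : Int) :
    (is.foldl aStep (res, d)).2.getD j 0
      = if j ∈ is ∧ 0 < d.getD j 0 then d.getD j 0 - 1 else d.getD j 0 := by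
  induction is generalizing res d with
  | nil => simp
  | cons i is ih =>
    have hnd' : is.Nodup := hnd.of_cons
    have hni : i ∉ is := (List.nodup_cons.mp hnd).1
    by_cases hpos : 0 < d.getD i 0
    · have hstep : aStep (res, d) i = (res ++ [Char.ofNat (i.toNat + 97)], d.modify i 0 (· - 1)) := by
        simp [aStep, hpos]
      rw [List.foldl_cons, hstep, ih _ _ hnd']
      by_cases hji : j = i
      · subst hji
        rw [if_neg (fun h => hni h.1), PySem.Dict.getD_modify, if_pos rfl,
          if_pos ⟨List.mem_cons_self, hpos⟩]
      · rw [PySem.Dict.getD_modify, if_neg hji]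
        by_cases hjm : j ∈ is
        · simp [hjm, List.mem_cons, hji]
        · simp [hjm, List.mem_cons, hji]
    · have hstep : aStep (res, d) i = (res, d) := by simp [aStep, hpos]
      rw [List.foldl_cons, hstep, ih _ _ hnd']
      by_cases hji : j = i
      · subst hji; simp [hpos, hni]
      · simp [List.mem_cons, hji]

-- ---------- A side: the while loop ----------

theorem rounds_succ (g g' : Int → Int) (m : Nat)
    (h : ∀ i ∈ intList, g' i = if 0 < g i then g i - 1 else g i)
    (hnn : ∀ i ∈ intList, 0 ≤ g i) :
    roundsA g (m + 1)
      = (intList.filter (fun i => decide (0 < g i))).map (fun i => Char.ofNat (i.toNat + 97))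
        ++ roundsA g' m := by
  have htail : ∀ r : Nat,
      (intList.filter (fun i => decide ((↑(Nat.succ r) : Int) < g i))).map
          (fun i => Char.ofNat (i.toNat + 97))
        = (intList.filter (fun i => decide ((r : Int) < g' i))).map
            (fun i => Char.ofNat (i.toNat + 97)) := by
    intro r
    congr 1
    apply List.filter_congr
    intro i hi
    have hg := h i hi
    have hn := hnn i hi
    apply decide_eq_decide.mpr
    generalize g i = v at hg hn
    generalize g' i = w at hg
    by_cases hpos : 0 < v
    · rw [hg, if_pos hpos]; push_cast; omega
    · rw [hg, if_neg hpos]; push_cast; omega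
  unfold roundsA
  rw [List.range_succ_eq_map, List.flatMap_cons, List.flatMap_map]
  refine congrArg₂ (· ++ ·) ?_ (flatMap_congr_fun htail _)
  norm_num

set_option maxRecDepth 4000 in
theorem aLoop_spec (fuel : Nat) (res : List Char) (d : PySem.Dict Int Int) (n : Nat)
    (hnn : ∀ i ∈ intList, 0 ≤ d.getD i 0)
    (hub : ∀ i ∈ intList, d.getD i 0 ≤ fuel)
    (hsum : (n : Int) = res.length + (intList.map (fun i => d.getD i 0)).sum) :
    aLoop fuel (res, d) n = res ++ roundsA (fun i => d.getD i 0) fuel := by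
  induction fuel generalizing res d with
  | zero =>
    show res = res ++ roundsA _ 0
    rw [roundsA, List.range_zero, List.flatMap_nil, List.append_nil]
  | succ fuel ih =>
    rw [show aLoop (fuel + 1) (res, d) n
        = if res.length = n then res else aLoop fuel (aPass (res, d)) n from rfl]
    by_cases hlen : res.length = n
    · rw [if_pos hlen]
      have hlen' : (res.length : Int) = (n : Int) := by exact_mod_cast congrArg Nat.cast hlen
      have hs0 : (intList.map (fun i => d.getD i 0)).sum = 0 := by linarith
      have hzero : ∀ i ∈ intList, d.getD i 0 = 0 := sum_map_eq_zero hnn hs0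
      have hnil : roundsA (fun i => d.getD i 0) (fuel + 1) = [] := by
        rw [roundsA]
        apply List.flatMap_eq_nil_iff.mpr
        intro r _
        have hf : intList.filter (fun i => decide ((r : Int) < d.getD i 0)) = [] := by
          apply List.filter_eq_nil_iff.mpr
          intro i hi
          rw [hzero i hi]
          simp only [decide_eq_true_eq]
          omega
        rw [hf, List.map_nil]
      rw [hnil, List.append_nil]
    · rw [if_neg hlen]
      have hfst : (aPass (res, d)).1
          = res ++ (intList.filter (fun i => decide (0 < d.getD i 0))).map
              (fun i => Char.ofNat (i.toNat + 97)) :=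
        aPass_fst intList res d intList_nodup
      have hsnd : ∀ j, (aPass (res, d)).2.getD j 0
          = if j ∈ intList ∧ 0 < d.getD j 0 then d.getD j 0 - 1 else d.getD j 0 :=
        aPass_snd intList res d intList_nodup
      generalize hpa : aPass (res, d) = st at hfst hsnd ⊢
      obtain ⟨res2, d2⟩ := st
      have hfst2 : res2 = res ++ (intList.filter (fun i => decide (0 < d.getD i 0))).map
          (fun i => Char.ofNat (i.toNat + 97)) := hfst
      have hsnd2 : ∀ j, d2.getD j 0
          = if j ∈ intList ∧ 0 < d.getD j 0 then d.getD j 0 - 1 else d.getD j 0 := hsnd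
      have hsnd' : ∀ i ∈ intList, d2.getD i 0
          = if 0 < d.getD i 0 then d.getD i 0 - 1 else d.getD i 0 := by
        intro i hi
        rw [hsnd2 i]
        by_cases hp : 0 < d.getD i 0
        · rw [if_pos ⟨hi, hp⟩, if_pos hp]
        · rw [if_neg (fun hc => hp hc.2), if_neg hp]
      rw [ih res2 d2 ?hnn ?hub ?hsum]
      case hnn =>
        intro i hi
        rw [hsnd' i hi]
        have h1 := hnn i hi
        generalize hv : d.getD i 0 = v at h1
        by_cases hp : 0 < v
        · rw [if_pos hp]; omega
        · rw [if_neg hp]; omega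
      case hub =>
        intro i hi
        rw [hsnd' i hi]
        have h1 := hub i hi
        have h2 := hnn i hi
        generalize hv : d.getD i 0 = v at h1 h2
        by_cases hp : 0 < v
        · rw [if_pos hp]; push_cast at h1 ⊢; omega
        · rw [if_neg hp]; push_cast at h1 ⊢; omega
      case hsum =>
        have hdec := sum_map_decrement intList (fun i => d.getD i 0)
          (fun i => d2.getD i 0) hsnd'
        rw [hfst2]
        simp only [List.length_append, List.length_map]
        rw [hdec]
        push_cast
        linarith
      rw [hfst2, List.append_assoc]
      exact congrArg (res ++ ·)
        (rounds_succ (fun i => d.getD i 0) (fun i => d2.getD i 0) fuel hsnd' hnn).symm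

-- ---------- B side: the tagging pass ----------

theorem bFold_snd (l : List Char) (ps : List (Int × Char)) (d : PySem.Dict Char Int) :
    (l.foldl bStep (ps, d)).2 = l.foldl (fun d c => d.insert c (d.getD c 0 + 1)) d := by
  induction l generalizing ps d with
  | nil => rfl
  | cons c l ih => rw [List.foldl_cons, List.foldl_cons]; exact ih _ _

theorem bFold_append (l : List Char) (a : Char) :
    ((l ++ [a]).foldl bStep ([], PySem.Dict.empty)).1
      = (l.foldl bStep ([], PySem.Dict.empty)).1 ++ [((l.count a : Int), a)] := by
  rw [List.foldl_append, List.foldl_cons, List.foldl_nil]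
  have hd : (l.foldl bStep ([], PySem.Dict.empty)).2.getD a 0 = (l.count a : Int) := by
    rw [bFold_snd, PySem.Dict.getD_foldl_insert_add_one, PySem.Dict.getD_empty, zero_add]
  show (l.foldl bStep ([], PySem.Dict.empty)).1
      ++ [((l.foldl bStep ([], PySem.Dict.empty)).2.getD a 0, a)] = _
  rw [hd]

theorem bP_mem (l : List Char) (k : Int) (c : Char) :
    (k, c) ∈ (l.foldl bStep ([], PySem.Dict.empty)).1 ↔ 0 ≤ k ∧ k < (l.count c : Int) := by
  induction l using List.reverseRecOn with
  | nil => simp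
  | append_singleton l a ih =>
    rw [bFold_append, List.mem_append, List.mem_singleton, ih, List.count_append, Prod.mk.injEq]
    by_cases hac : a = c
    · rw [hac]
      have hone : List.count c [c] = 1 := by simp
      rw [hone]
      constructor
      · rintro (⟨h0, hk⟩ | ⟨rfl, -⟩)
        · constructor
          · exact h0
          · push_cast; omega
        · constructor
          · exact_mod_cast Nat.zero_le _
          · push_cast; omega
      · rintro ⟨h0, hk⟩
        by_cases hlt : k < (l.count c : Int)
        · exact Or.inl ⟨h0, hlt⟩
        · refine Or.inr ⟨?_, rfl⟩
          push_cast at hk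
          omega
    · have hzero : List.count c [a] = 0 := by
        rw [List.count_singleton]
        simp [hac]
      rw [hzero, Nat.add_zero]
      constructor
      · rintro (h | ⟨-, rfl⟩)
        · exact h
        · exact absurd rfl hac
      · exact Or.inl

theorem bP_nodup (l : List Char) : (l.foldl bStep ([], PySem.Dict.empty)).1.Nodup := by
  induction l using List.reverseRecOn with
  | nil => simp
  | append_singleton l a ih =>
    rw [bFold_append]
    apply List.Nodup.append ih (List.nodup_singleton _)
    intro p hp hq
    rw [List.mem_singleton] at hq
    subst hq
    have hm := (bP_mem l _ _).mp hp
    omega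

-- ---------- the lexicographic key ----------

theorem lex_key (x y t1 t2 : Int) (h1 : 0 ≤ t1) (h2 : t1 < 4294967296)
    (h3 : 0 ≤ t2) (h4 : t2 < 4294967296) :
    x * 4294967296 + t1 < y * 4294967296 + t2 ↔ (x < y ∨ (x = y ∧ t1 < t2)) := by
  constructor
  · intro h
    rcases lt_trichotomy x y with hx | hx | hx
    · exact Or.inl hx
    · subst hx; right; exact ⟨rfl, by omega⟩
    · exfalso
      have hmul : (y + 1) * 4294967296 ≤ x * 4294967296 :=
        mul_le_mul_of_nonneg_right (by omega) (by norm_num)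
      nlinarith
  · rintro (hx | ⟨rfl, ht⟩)
    · have hmul : (x + 1) * 4294967296 ≤ y * 4294967296 :=
        mul_le_mul_of_nonneg_right (by omega) (by norm_num)
      nlinarith
    · omega

theorem phi_lt_iff (a b : Int × Char) :
    phi a < phi b ↔ (a.1 < b.1 ∨ (a.1 = b.1 ∧ a.2.toNat < b.2.toNat)) := by
  unfold phi
  rw [lex_key _ _ _ _ (by exact_mod_cast Nat.zero_le _) (by exact_mod_cast char_toNat_lt a.2)
    (by exact_mod_cast Nat.zero_le _) (by exact_mod_cast char_toNat_lt b.2)]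
  constructor
  · rintro (h | ⟨h, ht⟩)
    · exact Or.inl h
    · exact Or.inr ⟨h, by exact_mod_cast ht⟩
  · rintro (h | ⟨h, ht⟩)
    · exact Or.inl h
    · exact Or.inr ⟨h, by exact_mod_cast ht⟩

-- Python's tuple sort of the pairs IS the sort by the single key phi
theorem sorted2_eq_sorted_phi (xs : List (Int × Char)) :
    PySem.List.sorted2 xs (·.1) (·.2) false = PySem.List.sorted xs phi false := by
  rw [PySem.List.sorted_eq_foldl_insertBy]
  have hbf : (fun (a b : Int × Char) =>
        decide (a.1 < b.1) || (!decide (b.1 < a.1) && decide (a.2 < b.2)))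
      = (fun a b => decide (phi a < phi b)) := by
    funext a b
    by_cases h1 : a.1 < b.1
    · simp only [h1, decide_true, Bool.true_or]
      symm; rw [decide_eq_true_eq, phi_lt_iff]; exact Or.inl h1
    · by_cases h2 : b.1 < a.1
      · simp only [h1, h2, decide_true, decide_false, Bool.not_true, Bool.false_and,
          Bool.false_or]
        symm; rw [decide_eq_false_iff_not, phi_lt_iff]
        rintro (h | ⟨h, -⟩) <;> omega
      · have heq : a.1 = b.1 := le_antisymm (not_lt.mp h2) (not_lt.mp h1)
        by_cases h3 : a.2 < b.2
        · simp only [h1, h2, h3, decide_true, decide_false, Bool.not_false, Bool.true_and,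
            Bool.false_or]
          symm; rw [decide_eq_true_eq, phi_lt_iff]
          exact Or.inr ⟨heq, char_lt_iff.mp h3⟩
        · simp only [h1, h2, h3, decide_false, Bool.not_false, Bool.true_and, Bool.false_or]
          symm; rw [decide_eq_false_iff_not, phi_lt_iff]
          rintro (h | ⟨-, ht⟩)
          · omega
          · exact h3 (char_lt_iff.mpr ht)
  show List.foldl (fun acc x => PySem.List.insertBy
      (fun a b => decide (a.1 < b.1) || (!decide (b.1 < a.1) && decide (a.2 < b.2))) x acc) [] xs = _
  rw [hbf]

-- ---------- the canonical pair list ----------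

theorem charList_pairwise : charList.Pairwise (· < ·) := by decide

theorem mem_charList {c : Char} : c ∈ charList ↔ ∃ k < 26, c = achr k := by
  unfold charList
  simp only [List.mem_map, List.mem_range]
  constructor
  · rintro ⟨k, hk, rfl⟩; exact ⟨k, hk, rfl⟩
  · rintro ⟨k, hk, rfl⟩; exact ⟨k, hk, rfl⟩

theorem tpairs_mem (l : List Char) (m : Nat) (hpre : ∀ c ∈ l, 'a' ≤ c ∧ c ≤ 'z')
    (hm : l.length < m) (k : Int) (c : Char) :
    (k, c) ∈ tpairs l m ↔ 0 ≤ k ∧ k < (l.count c : Int) := by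
  unfold tpairs
  simp only [List.mem_flatMap, List.mem_map, List.mem_filter, List.mem_range,
    decide_eq_true_eq, Prod.mk.injEq]
  constructor
  · rintro ⟨r, hr, c', ⟨hc', hcnt⟩, hk, rfl⟩
    have hk' : k = (r : Int) := hk.symm
    subst hk'
    constructor
    · exact_mod_cast Nat.zero_le r
    · exact_mod_cast hcnt
  · rintro ⟨h0, hk⟩
    have hcnt : k.toNat < l.count c := by omega
    have hmem : c ∈ l := List.count_pos_iff.mp (by omega)
    obtain ⟨hach, hlt⟩ := char_eq_achr (hpre c hmem)
    refine ⟨k.toNat, ?_, c, ⟨?_, hcnt⟩, by omega, rfl⟩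
    · have hle := List.count_le_length (l := l) (a := c)
      omega
    · rw [mem_charList]
      exact ⟨c.toNat - 97, hlt, hach⟩

theorem tpairs_pairwise (l : List Char) (m : Nat) :
    (tpairs l m).Pairwise (fun a b => phi a < phi b) := by
  unfold tpairs
  rw [List.pairwise_flatMap]
  constructor
  · intro r _
    rw [List.pairwise_map]
    apply List.Pairwise.imp ?_ (List.Pairwise.sublist List.filter_sublist charList_pairwise)
    intro c c' hcc
    rw [phi_lt_iff]
    exact Or.inr ⟨rfl, char_lt_iff.mp hcc⟩
  · apply List.Pairwise.imp ?_ (List.pairwise_lt_range)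
    intro r1 r2 hr x hx y hy
    simp only [List.mem_map, List.mem_filter] at hx hy
    obtain ⟨c1, -, rfl⟩ := hx
    obtain ⟨c2, -, rfl⟩ := hy
    rw [phi_lt_iff]
    left
    show (r1 : Int) < (r2 : Int)
    exact_mod_cast hr

theorem tpairs_nodup (l : List Char) (m : Nat) : (tpairs l m).Nodup :=
  (tpairs_pairwise l m).imp (fun h => by
    intro he
    subst he
    exact lt_irrefl _ h)

-- ---------- bucket counts vs character counts ----------

theorem count_ckey (l : List Char) (hpre : ∀ c ∈ l, 'a' ≤ c ∧ c ≤ 'z') {k : Nat} (hk : k < 26) :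
    (l.map ckey).count ((k : Int)) = l.count (achr k) := by
  rw [List.count_eq_countP, List.countP_map, List.count_eq_countP]
  apply List.countP_congr
  intro c hc
  simp only [Function.comp_apply, beq_iff_eq]
  obtain ⟨h97, h122⟩ := hpre c hc
  have h1 : 97 ≤ c.toNat := char_le_iff.mp h97
  have h2 : c.toNat ≤ 122 := char_le_iff.mp h122
  constructor
  · intro h
    have hck : c.toNat = k + 97 := by unfold ckey at h; omega
    obtain ⟨hach, -⟩ := char_eq_achr ⟨h97, h122⟩
    rw [hach]
    congr 1
    omega
  · intro h
    subst h
    unfold ckey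
    rw [achr_toNat hk]
    push_cast
    omega

-- one round of A's output = one round of the canonical answer
theorem roundA_eq_canon (l : List Char) (hpre : ∀ c ∈ l, 'a' ≤ c ∧ c ≤ 'z') (r : Nat) :
    (intList.filter (fun i => decide ((r : Int) < ((l.map ckey).count i : Int)))).map
        (fun i => Char.ofNat (i.toNat + 97))
      = charList.filter (fun c => decide (r < l.count c)) := by
  rw [intList_eq, List.filter_map, List.map_map]
  unfold charList
  rw [List.filter_map]
  have hfil : (List.range 26).filter
        ((fun i => decide ((r : Int) < ((l.map ckey).count i : Int))) ∘ (fun (k : Nat) => (k : Int)))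
      = (List.range 26).filter ((fun c => decide (r < l.count c)) ∘ achr) := by
    apply List.filter_congr
    intro k hk
    rw [List.mem_range] at hk
    simp only [Function.comp_apply]
    apply decide_eq_decide.mpr
    rw [count_ckey l hpre hk]
    constructor
    · intro h; exact_mod_cast h
    · intro h; exact_mod_cast h
  rw [hfil]
  apply List.map_congr_left
  intro k hk
  simp only [Function.comp_apply]
  simp [achr]

-- ===== VERDICT (by name: the statement is the Claim_ definition above) =====
theorem counts_getD (l : List Char) (i : Int) :
    (l.foldl (fun d c => d.modify ((c.toNat : Int) - 97) 0 (· + 1)) PySem.Dict.empty).getD i 0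
      = ((l.map ckey).count i : Int) := by
  have hmap : l.foldl (fun d c => d.modify ((c.toNat : Int) - 97) 0 (· + 1))
        (PySem.Dict.empty : PySem.Dict Int Int)
      = (l.map ckey).foldl (fun d x => d.modify x 0 (· + 1))
          (PySem.Dict.empty : PySem.Dict Int Int) := by
    rw [List.foldl_map]
    rfl
  rw [hmap, PySem.Dict.getD_foldl_modify_add_one, PySem.Dict.getD_empty, zero_add]

theorem solve_A_canon (l : List Char) (hpre' : ∀ c ∈ l, 'a' ≤ c ∧ c ≤ 'z') :
    aLoop (l.length + 1)
        ([], l.foldl (fun d c => d.modify ((c.toNat : Int) - 97) 0 (· + 1)) PySem.Dict.empty) l.length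
      = canon l (l.length + 1) := by
  rw [aLoop_spec]
  · rw [List.nil_append, roundsA, canon]
    apply flatMap_congr_fun
    intro r
    calc (intList.filter (fun i => decide ((r : Int) <
            (l.foldl (fun d c => d.modify ((c.toNat : Int) - 97) 0 (· + 1)) PySem.Dict.empty).getD i 0))).map
          (fun i => Char.ofNat (i.toNat + 97))
        = (intList.filter (fun i => decide ((r : Int) < ((l.map ckey).count i : Int)))).map
            (fun i => Char.ofNat (i.toNat + 97)) := by
          congr 1
          apply List.filter_congr
          intro i _
          rw [counts_getD l i]
      _ = charList.filter (fun c => decide (r < l.count c)) := roundA_eq_canon l hpre' r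
  · intro i _
    rw [counts_getD l i]
    exact_mod_cast Nat.zero_le _
  · intro i _
    rw [counts_getD l i]
    have h1 : (l.map ckey).count i ≤ (l.map ckey).length := List.count_le_length
    rw [List.length_map] at h1
    push_cast
    omega
  · rw [List.length_nil, Nat.cast_zero, zero_add]
    have hmem : ∀ x ∈ l.map ckey, x ∈ intList := by
      intro x hx
      rw [List.mem_map] at hx
      obtain ⟨c, hc, rfl⟩ := hx
      obtain ⟨h97, h122⟩ := hpre' c hc
      have h1 : 97 ≤ c.toNat := char_le_iff.mp h97
      have h2 : c.toNat ≤ 122 := char_le_iff.mp h122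
      rw [mem_intList]
      unfold ckey
      omega
    have hsc := sum_counts (l.map ckey) intList intList_nodup hmem
    simp only [List.length_map] at hsc
    have harr : (intList.map fun i =>
        (l.foldl (fun d c => d.modify ((c.toNat : Int) - 97) 0 (· + 1)) PySem.Dict.empty).getD i 0)
        = intList.map (fun j => ((l.map ckey).count j : Int)) := by
      apply List.map_congr_left
      intro i _
      exact counts_getD l i
    rw [harr, hsc]

theorem solve_B_canon (l : List Char) (hpre' : ∀ c ∈ l, 'a' ≤ c ∧ c ≤ 'z') :
    (PySem.List.sorted2 ((l.foldl bStep ([], PySem.Dict.empty)).1) (·.1) (·.2) false).map (·.2)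
      = canon l (l.length + 1) := by
  rw [sorted2_eq_sorted_phi]
  have hperm : (tpairs l (l.length + 1)).Perm ((l.foldl bStep ([], PySem.Dict.empty)).1) := by
    rw [List.perm_ext_iff_of_nodup (tpairs_nodup l _) (bP_nodup l)]
    intro p
    obtain ⟨k, c⟩ := p
    rw [tpairs_mem l _ hpre' (Nat.lt_succ_self _) k c, bP_mem]
  rw [PySem.List.sorted_eq_of_perm_of_pairwise_lt _ _ phi hperm (tpairs_pairwise l _)]
  unfold tpairs canon
  rw [List.map_flatMap]
  apply flatMap_congr_fun
  intro r
  rw [List.map_map]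
  simp

theorem solve_spec : Claim_equal_solve := by
  intro s _ hpre
  have hpre' : ∀ c ∈ s.toList, 'a' ≤ c ∧ c ≤ 'z' := by
    intro c hc
    have h := List.all_eq_true.mp hpre c hc
    rw [Bool.and_eq_true, decide_eq_true_eq, decide_eq_true_eq] at h
    exact h
  unfold Spec_solve
  show String.mk (aLoop (s.toList.length + 1)
      ([], s.toList.foldl (fun d c => d.modify ((c.toNat : Int) - 97) 0 (· + 1)) PySem.Dict.empty)
      s.toList.length)
    = String.mk ((PySem.List.sorted2 ((s.toList.foldl bStep ([], PySem.Dict.empty)).1)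
        (·.1) (·.2) false).map (·.2))
  rw [solve_A_canon s.toList hpre', solve_B_canon s.toList hpre']
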